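-- pv_equiv track=rewrite | github.com/gauravrawat2005/CodeAlfa_tasks | CodeAlfa_task1/Gather accurate data/DataValidationTechnique.py | check_data_consistency
-- ===== SOURCE A (Python) =====
-- def check_data_consistency(data_list):
--     """Check if all records have expected fields"""
--     if not data_list:
--         return True
--
--     expected_fields = set(data_list[0].keys())
--     for item in data_list[1:]:
--         if set(item.keys()) != expected_fields:
--             return False
--     return True
-- ===== SOURCE B (Python) =====
-- def check_data_consistency(data_list):
--     """Check if all records have expected fields"""
--     signatures = {tuple(sorted(d.keys())) for d in data_list}
--     return len(signatures) <= 1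
-- ===== Notes on version B (the rewrite author's own statement) =====
-- stated objective: simpler
-- what changed: Instead of comparing every record's key-set against the first record's key-set with an early-exit loop, B collects the distinct sorted key-signatures of all records into one set and decides consistency by its cardinality (<= 1); there is no designated reference record and no short-circuit.
import Mathlib
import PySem

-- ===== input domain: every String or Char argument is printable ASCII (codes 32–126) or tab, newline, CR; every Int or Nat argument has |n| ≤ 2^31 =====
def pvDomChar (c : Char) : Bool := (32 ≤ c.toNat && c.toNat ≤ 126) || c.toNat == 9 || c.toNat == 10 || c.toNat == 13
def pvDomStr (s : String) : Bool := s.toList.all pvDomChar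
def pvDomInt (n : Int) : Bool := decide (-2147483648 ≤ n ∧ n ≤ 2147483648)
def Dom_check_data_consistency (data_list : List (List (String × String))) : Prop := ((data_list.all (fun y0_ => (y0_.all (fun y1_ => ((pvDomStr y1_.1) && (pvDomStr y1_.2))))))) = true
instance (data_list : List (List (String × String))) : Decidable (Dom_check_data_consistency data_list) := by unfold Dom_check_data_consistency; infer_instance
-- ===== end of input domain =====

-- B replaces A's compare-each-record-to-the-first loop by collecting the distinct
-- sorted key-signatures into one set and testing its cardinality (objective: simpler).

-- ===== PORT A =====
-- 'set(item.keys())' (a Python dict's keys are its distinct keys in insertion order)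
def pvKeySet (d : List (String × String)) : PySem.Set String :=
  PySem.Set.ofList (d.map Prod.fst)

-- the 'for item in data_list[1:]' loop with its early 'return False'
def pvLoopA (expected : PySem.Set String) : List (List (String × String)) → Bool
  | [] => true
  | item :: rest =>
      if ¬ PySem.Set.equal (pvKeySet item) expected then false
      else pvLoopA expected rest

def check_data_consistency (data_list : List (List (String × String))) : Bool :=
  match data_list with
  | [] => true                                  -- 'if not data_list: return True'
  | d0 :: rest => pvLoopA (pvKeySet d0) rest

-- ===== PORT B =====
-- 'tuple(sorted(d.keys()))'
def pvSig (d : List (String × String)) : List String :=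
  PySem.List.sorted (PySem.List.dedup (d.map Prod.fst)) (fun x => x) false

def check_data_consistency_alt (data_list : List (List (String × String))) : Bool :=
  let signatures : PySem.Set (List String) :=
    PySem.Set.ofList (data_list.map pvSig)
  decide (signatures.length ≤ 1)

-- ===== PRECONDITION & SPEC =====
def Spec_check_data_consistency (data_list : List (List (String × String))) (out : Bool) : Prop := out = check_data_consistency_alt data_list
instance (data_list : List (List (String × String))) (out : Bool) : Decidable (Spec_check_data_consistency data_list out) := by unfold Spec_check_data_consistency; infer_instance

-- ===== CLAIM (what is proved, stated in full; the proofs are below) =====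
def Claim_equal_check_data_consistency : Prop := ∀ (data_list : List (List (String × String))), Dom_check_data_consistency data_list → Spec_check_data_consistency data_list (check_data_consistency data_list)

-- ===== LEMMAS AND PROOFS =====

-- two records have equal key-SETS iff their sorted key-signatures are equal lists
theorem pvSig_eq_iff (d e : List (String × String)) :
    pvSig d = pvSig e ↔ PySem.Set.equal (pvKeySet d) (pvKeySet e) = true := by
  unfold pvSig pvKeySet
  rw [PySem.List.sorted_id_eq_sorted_id_iff_perm, PySem.Set.equal_iff,
      List.perm_ext_iff_of_nodup (PySem.List.nodup_dedup _) (PySem.List.nodup_dedup _)]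
  constructor
  · intro h x
    simpa [PySem.List.mem_dedup, PySem.Set.mem_ofList] using h x
  · intro h x
    simpa [PySem.List.mem_dedup, PySem.Set.mem_ofList] using h x

-- A's loop is the universally-quantified comparison against the reference key-set
theorem pvLoopA_eq_true_iff (expected : PySem.Set String) (l : List (List (String × String))) :
    pvLoopA expected l = true ↔ ∀ d ∈ l, PySem.Set.equal (pvKeySet d) expected = true := by
  induction l with
  | nil => simp [pvLoopA]
  | cons x t ih =>
      by_cases h : PySem.Set.equal (pvKeySet x) expected = true
      · rw [pvLoopA, if_neg (not_not_intro h), ih]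
        constructor
        · intro ha d hd
          rcases List.mem_cons.mp hd with rfl | hd
          · exact h
          · exact ha d hd
        · intro ha d hd
          exact ha d (List.mem_cons_of_mem _ hd)
      · rw [pvLoopA, if_pos h]
        simp only [Bool.false_eq_true, false_iff]
        intro ha
        exact h (ha x (by simp))

-- B's set of signatures has at most one element iff every signature equals the first
theorem pvAlt_eq_true_iff (d0 : List (String × String)) (rest : List (List (String × String))) :
    check_data_consistency_alt (d0 :: rest) = true ↔ ∀ d ∈ rest, pvSig d = pvSig d0 := by
  unfold check_data_consistency_alt
  rw [List.map_cons, PySem.Set.ofList_cons, decide_eq_true_iff, List.length_cons]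
  constructor
  · intro h d hd
    by_contra hne
    have hm : pvSig d ∈ PySem.Set.discard (PySem.Set.ofList (rest.map pvSig)) (pvSig d0) := by
      rw [PySem.Set.mem_discard]
      exact ⟨by rw [PySem.Set.mem_ofList]; exact List.mem_map_of_mem hd, hne⟩
    have h0 : (PySem.Set.discard (PySem.Set.ofList (rest.map pvSig)) (pvSig d0)).length = 0 := by
      omega
    rw [List.length_eq_zero_iff] at h0
    simp [h0] at hm
  · intro h
    have h0 : PySem.Set.discard (PySem.Set.ofList (rest.map pvSig)) (pvSig d0) = [] := by
      rw [List.eq_nil_iff_forall_not_mem]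
      intro s hs
      rw [PySem.Set.mem_discard, PySem.Set.mem_ofList, List.mem_map] at hs
      obtain ⟨⟨d, hd, rfl⟩, hne⟩ := hs
      exact hne (h d hd)
    rw [h0]
    simp

-- ===== VERDICT (by name: the statement is the Claim_ definition above) =====
theorem check_data_consistency_spec : Claim_equal_check_data_consistency := by
  intro data_list _
  unfold Spec_check_data_consistency
  match data_list with
  | [] => rfl
  | d0 :: rest =>
      rw [Bool.eq_iff_iff, check_data_consistency, pvLoopA_eq_true_iff, pvAlt_eq_true_iff]
      constructor
      · intro h d hd; exact (pvSig_eq_iff d d0).mpr (h d hd)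
      · intro h d hd; exact (pvSig_eq_iff d d0).mp (h d hd)
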